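-- pv_equiv track=rewrite | github.com/shettyvarshaa/DAA-Lab | P3_Optimal.py | find_optimal_route
-- ===== SOURCE A (Python) =====
-- def find_optimal_route(streets, money_collected):
--     current_money = 0
--     optimal_route = []
--     sorted_streets = sorted(zip(streets, money_collected), key=lambda x: x[1], reverse=True)
--     for street, money in sorted_streets:
--         if street not in optimal_route:
--             optimal_route.append(street)
--             current_money += money
--     return optimal_route, current_money
-- ===== SOURCE B (Python) =====
-- def find_optimal_route(streets, money_collected):
--     best = {}
--     for i, (s, m) in enumerate(zip(streets, money_collected)):
--         if s not in best or m > best[s][0]: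
--             best[s] = (m, i)
--     route = sorted(best, key=lambda s: (-best[s][0], best[s][1]))
--     total = sum(best[s][0] for s in route)
--     return route, total
-- ===== Notes on version B (the rewrite author's own statement) =====
-- stated objective: faster
-- what changed: Instead of sorting all n (street, money) pairs and deduplicating with a linear membership scan over the growing route, B makes one pass building a dict street -> (max money, index where that max first occurs), then sorts only the d distinct streets by (-money, index) and sums the stored maxima.
import Mathlib
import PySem

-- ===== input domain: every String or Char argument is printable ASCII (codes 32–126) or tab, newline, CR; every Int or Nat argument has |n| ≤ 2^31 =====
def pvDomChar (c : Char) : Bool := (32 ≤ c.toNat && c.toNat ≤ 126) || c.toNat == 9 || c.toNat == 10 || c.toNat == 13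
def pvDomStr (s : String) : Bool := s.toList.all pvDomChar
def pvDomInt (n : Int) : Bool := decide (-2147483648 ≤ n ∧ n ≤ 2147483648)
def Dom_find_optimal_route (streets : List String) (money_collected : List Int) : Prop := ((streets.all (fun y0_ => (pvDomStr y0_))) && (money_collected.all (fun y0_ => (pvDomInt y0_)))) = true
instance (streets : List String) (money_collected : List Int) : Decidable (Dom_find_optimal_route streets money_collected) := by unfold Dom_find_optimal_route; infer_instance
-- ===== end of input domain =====

-- B replaces A's "sort all pairs, then dedup with a membership scan" by a single dict pass
-- (street -> (max money, first index attaining it)) plus a sort of the distinct streets only.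


-- ===== PORT A =====
def find_optimal_route (streets : List String) (money_collected : List Int) : List String × Int :=
  let sorted_streets := PySem.List.sorted (streets.zip money_collected) (fun x => x.2) true
  sorted_streets.foldl
    (fun acc p => if p.1 ∈ acc.1 then acc else (acc.1 ++ [p.1], acc.2 + p.2))
    ([], 0)

-- ===== PORT B =====
-- one step of B's dict loop: 'if s not in best or m > best[s][0]: best[s] = (m, i)'
-- (best[s] is only read under 's in best', so the getD default is never the value used)
def pvBStep (d : PySem.Dict String (Int × Int)) (e : Int × (String × Int)) : PySem.Dict String (Int × Int) :=
  if !(d.contains e.2.1) || decide ((d.getD e.2.1 (0, 0)).1 < e.2.2) then d.insert e.2.1 (e.2.2, e.1) else d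

def find_optimal_route_alt (streets : List String) (money_collected : List Int) : List String × Int :=
  let best := (PySem.List.enumerate (streets.zip money_collected)).foldl pvBStep PySem.Dict.empty
  let route := PySem.List.sorted2 best.keys (fun s => -(best.getD s (0, 0)).1) (fun s => (best.getD s (0, 0)).2) false
  (route, (route.map (fun s => (best.getD s (0, 0)).1)).sum)

-- ===== PRECONDITION & SPEC =====
def Spec_find_optimal_route (streets : List String) (money_collected : List Int) (out : List String × Int) : Prop := out = find_optimal_route_alt streets money_collected
instance (streets : List String) (money_collected : List Int) (out : List String × Int) : Decidable (Spec_find_optimal_route streets money_collected out) := by unfold Spec_find_optimal_route; infer_instance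

-- ===== CLAIM (what is proved, stated in full; the proofs are below) =====
def Claim_equal_find_optimal_route : Prop := ∀ (streets : List String) (money_collected : List Int), Dom_find_optimal_route streets money_collected → Spec_find_optimal_route streets money_collected (find_optimal_route streets money_collected)

-- ===== LEMMAS AND PROOFS =====

-- Throughout, e : Int × (String × Int) is an enumerated pair (index, (street, money)).

-- the two insertion-sort comparators actually used by the ports
def pvLt2 (a b : Int × (String × Int)) : Bool :=
  decide (-a.2.2 < -b.2.2) || (!decide (-b.2.2 < -a.2.2) && decide (a.1 < b.1))
def pvLtA (a b : String × Int) : Bool := decide (b.2 < a.2)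

-- strict lexicographic order (money desc, index asc) on enumerated elements
def pvLex (a b : Int × (String × Int)) : Prop := b.2.2 < a.2.2 ∨ (a.2.2 = b.2.2 ∧ a.1 < b.1)

-- first-occurrence-per-street dedup of a pair list / of an enumerated list
def pvDedupP (seen : List String) : List (String × Int) → List (String × Int)
  | [] => []
  | p :: t => if p.1 ∈ seen then pvDedupP seen t else p :: pvDedupP (p.1 :: seen) t
def pvDedupE (seen : List String) : List (Int × (String × Int)) → List (Int × (String × Int))
  | [] => []
  | e :: t => if e.2.1 ∈ seen then pvDedupE seen t else e :: pvDedupE (e.2.1 :: seen) t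

-- B's per-street record update, on the option holding the current record
def pvUpd (o : Option (Int × Int)) (e : Int × (String × Int)) : Option (Int × Int) :=
  match o with
  | none => some (e.2.2, e.1)
  | some (m0, i0) => if m0 < e.2.2 then some (e.2.2, e.1) else some (m0, i0)

-- "e is the best record of street s in E": max money, earliest index attaining it
def pvBest (E : List (Int × (String × Int))) (s : String) (e : Int × (String × Int)) : Prop :=
  e ∈ E ∧ e.2.1 = s ∧ ∀ e' ∈ E, e'.2.1 = s → (e'.2.2 < e.2.2 ∨ (e'.2.2 = e.2.2 ∧ e.1 ≤ e'.1))

theorem pv_sorted2_eq (E : List (Int × (String × Int))) :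
    PySem.List.sorted2 E (fun e => -e.2.2) (fun e => e.1) false
      = E.foldl (fun acc x => PySem.List.insertBy pvLt2 x acc) [] := rfl

theorem pv_sortedA_eq (xs : List (String × Int)) :
    PySem.List.sorted xs (fun p => p.2) true
      = xs.foldl (fun acc x => PySem.List.insertBy pvLtA x acc) [] := by
  rw [PySem.List.sorted_rev_eq_foldl_insertBy]; rfl

theorem pv_map_insertBy {β α : Type} (f : β → α) (bB : β → β → Bool) (bA : α → α → Bool)
    (x : β) (ys : List β) (h : ∀ y ∈ ys, bB x y = bA (f x) (f y)) :
    (PySem.List.insertBy bB x ys).map f = PySem.List.insertBy bA (f x) (ys.map f) := by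
  induction ys with
  | nil => simp [PySem.List.insertBy]
  | cons y t ih =>
    have hy := h y (by simp)
    have ih' := ih (fun z hz => h z (by simp [hz]))
    cases hcase : bB x y <;> simp_all [PySem.List.insertBy]

theorem pv_mem_enumerate_le {α : Type} (xs : List α) (k : Int) (e : Int × α)
    (h : e ∈ PySem.List.enumerate xs k) : k ≤ e.1 := by
  induction xs generalizing k with
  | nil => simp [PySem.List.enumerate] at h
  | cons x t ih =>
    rw [show PySem.List.enumerate (x :: t) k = (k, x) :: PySem.List.enumerate t (k + 1) from rfl] at h
    rcases List.mem_cons.1 h with h | h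
    · subst h; simp
    · have := ih (k + 1) h; omega

theorem pv_enumerate_pairwise {α : Type} (xs : List α) (k : Int) :
    (PySem.List.enumerate xs k).Pairwise (fun a b => a.1 < b.1) := by
  induction xs generalizing k with
  | nil => simp [PySem.List.enumerate]
  | cons x t ih =>
    rw [show PySem.List.enumerate (x :: t) k = (k, x) :: PySem.List.enumerate t (k + 1) from rfl]
    exact List.Pairwise.cons (fun e he => by have := pv_mem_enumerate_le t (k+1) e he; omega) (ih (k+1))

-- stability: A's reverse sort by money is the snd-projection of the strict lex sort of the enumeration
theorem pv_stability (xs : List (String × Int)) :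
    ∀ (k : Int) (accB : List (Int × (String × Int))) (accA : List (String × Int)),
    accA = accB.map (·.2) → (∀ e ∈ accB, e.1 < k) →
    ((PySem.List.enumerate xs k).foldl (fun acc x => PySem.List.insertBy pvLt2 x acc) accB).map (·.2)
      = xs.foldl (fun acc x => PySem.List.insertBy pvLtA x acc) accA := by
  induction xs with
  | nil => intro k accB accA hA _; simp [PySem.List.enumerate, hA]
  | cons x t ih =>
    intro k accB accA hA hlt
    rw [show PySem.List.enumerate (x :: t) k = (k, x) :: PySem.List.enumerate t (k + 1) from rfl]
    simp only [List.foldl_cons]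
    apply ih (k + 1)
    · subst hA
      exact (pv_map_insertBy (·.2) pvLt2 pvLtA (k, x) accB (fun y hy => by
        have : decide (k < y.1) = false := by simp; exact le_of_lt (hlt y hy)
        simp only [pvLt2, pvLtA, this, Bool.and_false, Bool.or_false]
        simp only [decide_eq_decide]; omega)).symm
    · intro e he
      rcases (PySem.List.mem_insertBy _ _ _ _).1 he with h | h
      · subst h; omega
      · have := hlt e h; omega

theorem pv_pairwise_insertBy {α : Type} (before : α → α → Bool)
    (asym : ∀ a b, before a b = true → before b a = false)
    (trans : ∀ a b c, before a b = true → before b c = true → before a c = true)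
    (x : α) (ys : List α) (h : ys.Pairwise (fun a b => before b a = false)) :
    (PySem.List.insertBy before x ys).Pairwise (fun a b => before b a = false) := by
  induction ys with
  | nil => simp [PySem.List.insertBy]
  | cons y t ih =>
    rw [show PySem.List.insertBy before x (y :: t)
        = if before x y then x :: y :: t else y :: PySem.List.insertBy before x t from rfl]
    rcases List.pairwise_cons.1 h with ⟨hy, ht⟩
    by_cases hb : before x y = true
    · rw [if_pos hb]
      refine List.Pairwise.cons ?_ h
      intro z hz
      rcases List.mem_cons.1 hz with rfl | hz
      · exact asym _ _ hb
      · by_cases hzx : before z x = true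
        · have := trans z x y hzx hb
          rw [hy z hz] at this; exact absurd this (by simp)
        · simpa using hzx
    · rw [if_neg hb]
      refine List.Pairwise.cons ?_ (ih ht)
      intro z hz
      rcases (PySem.List.mem_insertBy _ _ _ _).1 hz with rfl | hz
      · simpa using hb
      · exact hy z hz

theorem pv_pairwise_foldl_insertBy {α : Type} (before : α → α → Bool)
    (asym : ∀ a b, before a b = true → before b a = false)
    (trans : ∀ a b c, before a b = true → before b c = true → before a c = true) :
    ∀ (l acc : List α), acc.Pairwise (fun a b => before b a = false) →
      (l.foldl (fun acc x => PySem.List.insertBy before x acc) acc).Pairwise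
        (fun a b => before b a = false) := by
  intro l
  induction l with
  | nil => intro acc h; simpa using h
  | cons x t ih =>
    intro acc h
    simp only [List.foldl_cons]
    exact ih _ (pv_pairwise_insertBy before asym trans x acc h)

theorem pvDedupP_congr (l : List (String × Int)) : ∀ (s₁ s₂ : List String),
    (∀ s, s ∈ s₁ ↔ s ∈ s₂) → pvDedupP s₁ l = pvDedupP s₂ l := by
  induction l with
  | nil => intro _ _ _; rfl
  | cons p t ih =>
    intro s₁ s₂ h
    simp only [pvDedupP]
    by_cases hp : p.1 ∈ s₁
    · rw [if_pos hp, if_pos ((h p.1).1 hp), ih _ _ h]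
    · rw [if_neg hp, if_neg (fun hc => hp ((h p.1).2 hc)),
        ih (p.1 :: s₁) (p.1 :: s₂) (fun s => by simp only [List.mem_cons]; exact or_congr Iff.rfl (h s))]

theorem pv_foldA (l : List (String × Int)) : ∀ (r : List String) (c : Int),
    l.foldl (fun acc p => if p.1 ∈ acc.1 then acc else (acc.1 ++ [p.1], acc.2 + p.2)) (r, c)
      = (r ++ (pvDedupP r l).map (·.1), c + ((pvDedupP r l).map (·.2)).sum) := by
  induction l with
  | nil => intro r c; simp [pvDedupP]
  | cons p t ih =>
    intro r c
    simp only [List.foldl_cons, pvDedupP]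
    by_cases hp : p.1 ∈ r
    · rw [if_pos hp]; simp only [if_pos hp]; exact ih r c
    · rw [if_neg hp]; simp only [if_neg hp]
      rw [ih (r ++ [p.1]) (c + p.2),
        pvDedupP_congr t (r ++ [p.1]) (p.1 :: r) (fun s => by simp [or_comm])]
      simp only [List.map_cons, List.sum_cons, List.append_assoc, List.cons_append,
        List.nil_append]
      refine Prod.ext rfl ?_
      simp only []
      ring

theorem pv_dedup_map (M : List (Int × (String × Int))) : ∀ (seen : List String),
    pvDedupP seen (M.map (·.2)) = (pvDedupE seen M).map (·.2) := by
  induction M with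
  | nil => intro seen; rfl
  | cons e t ih =>
    intro seen
    simp only [List.map_cons, pvDedupP, pvDedupE]
    by_cases hp : e.2.1 ∈ seen
    · rw [if_pos hp, if_pos hp, ih seen]
    · rw [if_neg hp, if_neg hp, List.map_cons, ih (e.2.1 :: seen)]

theorem pvDedupE_sublist (M : List (Int × (String × Int))) : ∀ (seen : List String),
    (pvDedupE seen M).Sublist M := by
  induction M with
  | nil => intro _; simp [pvDedupE]
  | cons e t ih =>
    intro seen
    simp only [pvDedupE]
    by_cases hp : e.2.1 ∈ seen
    · rw [if_pos hp]; exact (ih seen).cons e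
    · rw [if_neg hp]; exact (ih _).cons₂ e

theorem pv_dedupE_best (M : List (Int × (String × Int))) : ∀ (seen : List String),
    M.Pairwise pvLex → ∀ e ∈ pvDedupE seen M,
      e ∈ M ∧ e.2.1 ∉ seen ∧ ∀ e' ∈ M, e'.2.1 = e.2.1 → e = e' ∨ pvLex e e' := by
  induction M with
  | nil => intro seen _ e he; simp [pvDedupE] at he
  | cons f t ih =>
    intro seen hpw e he
    rcases List.pairwise_cons.1 hpw with ⟨hf, ht⟩
    simp only [pvDedupE] at he
    by_cases hp : f.2.1 ∈ seen
    · rw [if_pos hp] at he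
      obtain ⟨hmem, hseen, hmin⟩ := ih seen ht e he
      refine ⟨List.mem_cons_of_mem _ hmem, hseen, ?_⟩
      intro e' he' hst
      rcases List.mem_cons.1 he' with rfl | he'
      · exact absurd (hst ▸ hp) hseen
      · exact hmin e' he' hst
    · rw [if_neg hp] at he
      rcases List.mem_cons.1 he with rfl | he
      · refine ⟨List.mem_cons_self, hp, ?_⟩
        intro e' he' _
        rcases List.mem_cons.1 he' with rfl | he'
        · exact Or.inl rfl
        · exact Or.inr (hf e' he')
      · obtain ⟨hmem, hseen, hmin⟩ := ih _ ht e he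
        have hne : e.2.1 ≠ f.2.1 := fun hc => hseen (by simp [hc])
        refine ⟨List.mem_cons_of_mem _ hmem, fun hc => hseen (by simp [hc]), ?_⟩
        intro e' he' hst
        rcases List.mem_cons.1 he' with rfl | he'
        · exact absurd hst hne.symm
        · exact hmin e' he' hst

theorem pv_mem_dedupE_streets (M : List (Int × (String × Int))) : ∀ (seen : List String) (s : String),
    s ∈ (pvDedupE seen M).map (·.2.1) ↔ s ∈ M.map (·.2.1) ∧ s ∉ seen := by
  induction M with
  | nil => intro seen s; simp [pvDedupE]
  | cons e t ih =>
    intro seen s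
    simp only [pvDedupE, List.map_cons, List.mem_cons]
    by_cases hp : e.2.1 ∈ seen
    · rw [if_pos hp, ih]
      constructor
      · rintro ⟨h1, h2⟩; exact ⟨Or.inr h1, h2⟩
      · rintro ⟨h1 | h1, h2⟩
        · exact absurd (h1 ▸ hp) h2
        · exact ⟨h1, h2⟩
    · rw [if_neg hp, List.map_cons, List.mem_cons, ih]
      constructor
      · rintro (rfl | ⟨h1, h2⟩)
        · exact ⟨Or.inl rfl, hp⟩
        · refine ⟨Or.inr h1, fun hc => h2 (by simp [hc])⟩
      · rintro ⟨rfl | h1, h2⟩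
        · exact Or.inl rfl
        · by_cases hs : s = e.2.1
          · exact Or.inl hs
          · exact Or.inr ⟨h1, by simp [hs, h2]⟩

theorem pv_nodup_dedupE_streets (M : List (Int × (String × Int))) : ∀ (seen : List String),
    ((pvDedupE seen M).map (·.2.1)).Nodup := by
  induction M with
  | nil => intro _; simp [pvDedupE]
  | cons e t ih =>
    intro seen
    simp only [pvDedupE]
    by_cases hp : e.2.1 ∈ seen
    · rw [if_pos hp]; exact ih seen
    · rw [if_neg hp, List.map_cons]
      refine List.nodup_cons.2 ⟨fun hc => ?_, ih _⟩
      exact ((pv_mem_dedupE_streets t _ _).1 hc).2 (by simp)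

theorem pv_bstep_get? (d : PySem.Dict String (Int × Int)) (e : Int × (String × Int)) (s : String) :
    (pvBStep d e).get? s = if e.2.1 = s then pvUpd (d.get? s) e else d.get? s := by
  by_cases hs : e.2.1 = s
  · subst hs
    rw [if_pos rfl]
    unfold pvBStep pvUpd
    rw [PySem.Dict.contains_eq_isSome_get?, PySem.Dict.getD_eq_get?_getD]
    cases hg : d.get? e.2.1 with
    | none => simp [PySem.Dict.get?_insert_self]
    | some v =>
      rcases v with ⟨m0, i0⟩
      simp only [Option.isSome_some, Bool.not_true, Bool.false_or, Option.getD_some,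
        decide_eq_true_eq]
      by_cases hm : m0 < e.2.2
      · rw [if_pos (by simpa using hm), if_pos hm, PySem.Dict.get?_insert_self]
      · rw [if_neg (by simpa using hm), if_neg hm, hg]
  · rw [if_neg hs]
    unfold pvBStep
    by_cases hc : (!(d.contains e.2.1) || decide ((d.getD e.2.1 (0, 0)).1 < e.2.2)) = true
    · rw [if_pos hc, PySem.Dict.get?_insert_of_ne d (e.2.2, e.1) (Ne.symm hs)]
    · rw [if_neg hc]

theorem pv_bget?_foldl (l : List (Int × (String × Int))) : ∀ (d : PySem.Dict String (Int × Int)) (s : String),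
    (l.foldl pvBStep d).get? s = (l.filter (fun e => e.2.1 == s)).foldl pvUpd (d.get? s) := by
  induction l with
  | nil => intro d s; rfl
  | cons e t ih =>
    intro d s
    simp only [List.foldl_cons, List.filter_cons]
    by_cases hs : e.2.1 = s
    · rw [if_pos (by simpa using hs), List.foldl_cons, ih, pv_bstep_get?, if_pos hs]
    · rw [if_neg (by simpa using hs), ih, pv_bstep_get?, if_neg hs]

theorem pv_upd_some (rs : List (Int × (String × Int))) : ∀ (v : Int × Int),
    ∃ w, rs.foldl pvUpd (some v) = some w := by
  induction rs with
  | nil => intro v; exact ⟨v, rfl⟩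
  | cons r t ih =>
    intro v
    rcases v with ⟨m0, i0⟩
    simp only [List.foldl_cons, pvUpd]
    by_cases hm : m0 < r.2.2
    · rw [if_pos hm]; exact ih _
    · rw [if_neg hm]; exact ih _

theorem pv_nodup_keys_fold (l : List (Int × (String × Int))) :
    ∀ (d : PySem.Dict String (Int × Int)), d.keys.Nodup → (l.foldl pvBStep d).keys.Nodup := by
  induction l with
  | nil => intro d h; exact h
  | cons e t ih =>
    intro d h
    simp only [List.foldl_cons]
    apply ih
    unfold pvBStep
    by_cases hc : (!(d.contains e.2.1) || decide ((d.getD e.2.1 (0, 0)).1 < e.2.2)) = true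
    · rw [if_pos hc]; exact PySem.Dict.nodup_keys_insert _ _ _ h
    · rw [if_neg hc]; exact h

theorem pv_minrec_aux (t : List (Int × (String × Int))) :
    ∀ (e₀ : Int × (String × Int)), t.Pairwise (fun a b => a.1 < b.1) → (∀ r ∈ t, e₀.1 < r.1) →
    ∃ e, (e = e₀ ∨ e ∈ t) ∧ t.foldl pvUpd (some (e₀.2.2, e₀.1)) = some (e.2.2, e.1) ∧
      ∀ e', (e' = e₀ ∨ e' ∈ t) → e'.2.2 < e.2.2 ∨ (e'.2.2 = e.2.2 ∧ e.1 ≤ e'.1) := by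
  induction t with
  | nil =>
    intro e₀ _ _
    refine ⟨e₀, Or.inl rfl, rfl, ?_⟩
    rintro e' (rfl | h)
    · exact Or.inr ⟨rfl, le_refl _⟩
    · simp at h
  | cons r t ih =>
    intro e₀ hpw hlt
    rcases List.pairwise_cons.1 hpw with ⟨hr, ht⟩
    simp only [List.foldl_cons, pvUpd]
    by_cases hm : e₀.2.2 < r.2.2
    · rw [if_pos hm]
      obtain ⟨e, hmem, hfold, hmin⟩ := ih r ht hr
      refine ⟨e, ?_, hfold, ?_⟩
      · rcases hmem with rfl | h
        · exact Or.inr List.mem_cons_self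
        · exact Or.inr (List.mem_cons_of_mem _ h)
      · rintro e' (rfl | h)
        · have := hmin r (Or.inl rfl)
          left; omega
        · rcases List.mem_cons.1 h with rfl | h
          · exact hmin e' (Or.inl rfl)
          · exact hmin e' (Or.inr h)
    · rw [if_neg hm]
      obtain ⟨e, hmem, hfold, hmin⟩ := ih e₀ ht (fun x hx => hlt x (List.mem_cons_of_mem _ hx))
      refine ⟨e, ?_, hfold, ?_⟩
      · rcases hmem with rfl | h
        · exact Or.inl rfl
        · exact Or.inr (List.mem_cons_of_mem _ h)
      · rintro e' (rfl | h)
        · exact hmin e' (Or.inl rfl)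
        · rcases List.mem_cons.1 h with rfl | h
          · have h0 := hmin e₀ (Or.inl rfl)
            by_cases hq : e'.2.2 < e.2.2
            · exact Or.inl hq
            · right
              have := hlt e' (List.mem_cons_self)
              constructor <;> omega
          · exact hmin e' (Or.inr h)

theorem pv_minrec (rs : List (Int × (String × Int))) (hne : rs ≠ [])
    (hpw : rs.Pairwise (fun a b => a.1 < b.1)) :
    ∃ e ∈ rs, rs.foldl pvUpd none = some (e.2.2, e.1) ∧
      ∀ e' ∈ rs, e'.2.2 < e.2.2 ∨ (e'.2.2 = e.2.2 ∧ e.1 ≤ e'.1) := by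
  cases rs with
  | nil => exact absurd rfl hne
  | cons r t =>
    rcases List.pairwise_cons.1 hpw with ⟨hr, ht⟩
    obtain ⟨e, hmem, hfold, hmin⟩ := pv_minrec_aux t r ht hr
    refine ⟨e, ?_, ?_, ?_⟩
    · rcases hmem with rfl | h
      · exact List.mem_cons_self
      · exact List.mem_cons_of_mem _ h
    · simpa [pvUpd] using hfold
    · intro e' he'
      rcases List.mem_cons.1 he' with rfl | h
      · exact hmin e' (Or.inl rfl)
      · exact hmin e' (Or.inr h)

-- the dict built by B has an entry for s iff some enumerated pair has street s
theorem pv_contains_iff (l : List (Int × (String × Int))) (s : String) :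
    ((l.foldl pvBStep PySem.Dict.empty).get? s).isSome = true ↔ ∃ e ∈ l, e.2.1 = s := by
  rw [pv_bget?_foldl, PySem.Dict.get?_empty]
  cases hf : l.filter (fun e => e.2.1 == s) with
  | nil =>
    simp only [List.foldl_nil, Option.isSome_none, Bool.false_eq_true, false_iff]
    rintro ⟨e, he, hs⟩
    have := List.filter_eq_nil_iff.1 hf e he
    simp [hs] at this
  | cons r t =>
    have hr : r ∈ l.filter (fun e => e.2.1 == s) := by rw [hf]; exact List.mem_cons_self
    simp only [List.foldl_cons, pvUpd]
    obtain ⟨w, hw⟩ := pv_upd_some t (r.2.2, r.1)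
    rw [hw]
    simp only [Option.isSome_some, true_iff]
    exact ⟨r, (List.mem_filter.1 hr).1, by simpa using (List.mem_filter.1 hr).2⟩

-- any value stored by B's dict is a best record
theorem pv_best_get? (l : List (Int × (String × Int))) (s : String) (v : Int × Int)
    (hpw : l.Pairwise (fun a b => a.1 < b.1))
    (h : (l.foldl pvBStep PySem.Dict.empty).get? s = some v) :
    ∃ e, pvBest l s e ∧ v = (e.2.2, e.1) := by
  rw [pv_bget?_foldl, PySem.Dict.get?_empty] at h
  cases hf : l.filter (fun e => e.2.1 == s) with
  | nil => rw [hf] at h; simp at h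
  | cons r t =>
    rw [hf] at h
    have hpwf : (r :: t).Pairwise (fun a b => a.1 < b.1) := hf ▸ hpw.sublist List.filter_sublist
    obtain ⟨e, hmem, hfold, hmin⟩ := pv_minrec (r :: t) (by simp) hpwf
    rw [hfold] at h
    have hme := List.mem_filter.1 (hf ▸ hmem : e ∈ l.filter (fun e => e.2.1 == s))
    refine ⟨e, ⟨hme.1, by simpa using hme.2, ?_⟩, (Option.some_injective _ h).symm⟩
    intro e' he' hs'
    exact hmin e' (hf ▸ List.mem_filter.2 ⟨he', by simpa using hs'⟩)

-- in an enumeration the index determines the element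
theorem pv_enum_inj (xs : List (String × Int)) (a b : Int × (String × Int))
    (ha : a ∈ PySem.List.enumerate xs 0) (hb : b ∈ PySem.List.enumerate xs 0)
    (hab : a.1 = b.1) : a = b := by
  have hnd : ((PySem.List.enumerate xs 0).map (·.1)).Nodup := by
    rw [List.nodup_iff_pairwise_ne, List.pairwise_map]
    exact (pv_enumerate_pairwise xs 0).imp (fun h => by omega)
  exact List.inj_on_of_nodup_map hnd ha hb hab

theorem pv_best_unique (xs : List (String × Int)) (s : String) (e e' : Int × (String × Int))
    (h : pvBest (PySem.List.enumerate xs 0) s e) (h' : pvBest (PySem.List.enumerate xs 0) s e') :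
    e = e' := by
  obtain ⟨hm, hs, hmin⟩ := h
  obtain ⟨hm', hs', hmin'⟩ := h'
  have h1 := hmin e' hm' hs'
  have h2 := hmin' e hm hs
  exact pv_enum_inj xs e e' hm hm' (by omega)


-- B's route-sort comparator, pulled back through the dict
def pvKLt (d : PySem.Dict String (Int × Int)) (a b : String) : Bool :=
  decide (-(d.getD a (0, 0)).1 < -(d.getD b (0, 0)).1) ||
    (!decide (-(d.getD b (0, 0)).1 < -(d.getD a (0, 0)).1) && decide ((d.getD a (0, 0)).2 < (d.getD b (0, 0)).2))

theorem pv_sorted2K_eq (d : PySem.Dict String (Int × Int)) :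
    PySem.List.sorted2 d.keys (fun s => -(d.getD s (0, 0)).1) (fun s => (d.getD s (0, 0)).2) false
      = d.keys.foldl (fun acc x => PySem.List.insertBy (pvKLt d) x acc) [] := rfl

theorem pv_lt2_asym (a b : Int × (String × Int)) (h : pvLt2 a b = true) : pvLt2 b a = false := by
  simp only [pvLt2, Bool.or_eq_true, Bool.and_eq_true, Bool.not_eq_eq_eq_not, Bool.not_true,
    decide_eq_true_eq, decide_eq_false_iff_not] at h
  simp only [pvLt2, Bool.or_eq_false_iff, Bool.and_eq_false_iff, Bool.not_eq_eq_eq_not,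
    Bool.not_false, decide_eq_true_eq, decide_eq_false_iff_not]
  omega

theorem pv_lt2_trans (a b c : Int × (String × Int)) (h1 : pvLt2 a b = true) (h2 : pvLt2 b c = true) :
    pvLt2 a c = true := by
  simp only [pvLt2, Bool.or_eq_true, Bool.and_eq_true, Bool.not_eq_eq_eq_not, Bool.not_true,
    decide_eq_true_eq, decide_eq_false_iff_not] at *
  omega

theorem pv_klt_asym (d : PySem.Dict String (Int × Int)) (a b : String)
    (h : pvKLt d a b = true) : pvKLt d b a = false := by
  simp only [pvKLt, Bool.or_eq_true, Bool.and_eq_true, Bool.not_eq_eq_eq_not, Bool.not_true,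
    decide_eq_true_eq, decide_eq_false_iff_not] at h
  simp only [pvKLt, Bool.or_eq_false_iff, Bool.and_eq_false_iff, Bool.not_eq_eq_eq_not,
    Bool.not_false, decide_eq_true_eq, decide_eq_false_iff_not]
  omega

theorem pv_klt_trans (d : PySem.Dict String (Int × Int)) (a b c : String)
    (h1 : pvKLt d a b = true) (h2 : pvKLt d b c = true) : pvKLt d a c = true := by
  simp only [pvKLt, Bool.or_eq_true, Bool.and_eq_true, Bool.not_eq_eq_eq_not, Bool.not_true,
    decide_eq_true_eq, decide_eq_false_iff_not] at *
  omega

theorem pv_enum_nodup_fst (xs : List (String × Int)) :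
    ((PySem.List.enumerate xs 0).map (·.1)).Nodup := by
  rw [List.nodup_iff_pairwise_ne, List.pairwise_map]
  exact (pv_enumerate_pairwise xs 0).imp (fun h => by omega)

-- ===== VERDICT (by name: the statement is the Claim_ definition above) =====
theorem find_optimal_route_spec : Claim_equal_find_optimal_route := by
  intro streets money _
  unfold Spec_find_optimal_route find_optimal_route find_optimal_route_alt
  set pairs := streets.zip money with hpairs
  set E := PySem.List.enumerate pairs 0 with hE
  set M := E.foldl (fun acc x => PySem.List.insertBy pvLt2 x acc) [] with hM
  set d := E.foldl pvBStep PySem.Dict.empty with hd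
  set N := pvDedupE [] M with hN
  -- A's sorted list is the snd-projection of the lex sort M
  have hSS : PySem.List.sorted pairs (fun x => x.2) true = M.map (·.2) := by
    rw [pv_sortedA_eq]
    exact (pv_stability pairs 0 [] [] rfl (by simp)).symm
  -- facts about E and M
  have hpwE : E.Pairwise (fun a b => a.1 < b.1) := pv_enumerate_pairwise pairs 0
  have hMperm : M.Perm E := by
    rw [hM, ← pv_sorted2_eq]
    exact PySem.List.sorted2_perm E _ _ false
  have hMpw2 : M.Pairwise (fun a b => pvLt2 b a = false) :=
    pv_pairwise_foldl_insertBy pvLt2 pv_lt2_asym pv_lt2_trans E [] (by simp)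
  have hMidx : M.Pairwise (fun a b => a.1 ≠ b.1) := by
    have : ((M.map (·.1)).Nodup) := ((hMperm.map (·.1)).nodup_iff).2 (pv_enum_nodup_fst pairs)
    rw [List.nodup_iff_pairwise_ne, List.pairwise_map] at this
    exact this
  have hMlex : M.Pairwise pvLex := by
    refine (hMpw2.and hMidx).imp (fun {a b} h => ?_)
    obtain ⟨h1, h2⟩ := h
    simp only [pvLt2, Bool.or_eq_false_iff, Bool.and_eq_false_iff, decide_eq_false_iff_not,
      Bool.not_eq_eq_eq_not, Bool.not_false, decide_eq_true_eq] at h1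
    unfold pvLex
    omega
  -- every element of the dedup N is the best record of its street
  have hbestN : ∀ e ∈ N, pvBest E e.2.1 e := by
    intro e he
    obtain ⟨hmem, _, hmin⟩ := pv_dedupE_best M [] hMlex e he
    refine ⟨hMperm.subset hmem, rfl, ?_⟩
    intro e' he' hs'
    rcases hmin e' (hMperm.mem_iff.2 he') hs' with rfl | hlex
    · exact Or.inr ⟨rfl, le_refl _⟩
    · unfold pvLex at hlex; omega
  -- B's dict lookup at the street of e ∈ N returns e's record
  have hlookup : ∀ e ∈ N, d.get? e.2.1 = some (e.2.2, e.1) := by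
    intro e he
    have hsome : (d.get? e.2.1).isSome = true :=
      (pv_contains_iff E e.2.1).2 ⟨e, (hbestN e he).1, rfl⟩
    obtain ⟨v, hv⟩ := Option.isSome_iff_exists.1 hsome
    obtain ⟨eb, hbestb, hvb⟩ := pv_best_get? E e.2.1 v hpwE hv
    rw [hv, hvb, pv_best_unique pairs e.2.1 eb e hbestb (hbestN e he)]
  have hlookupD : ∀ e ∈ N, d.getD e.2.1 (0, 0) = (e.2.2, e.1) := by
    intro e he
    rw [PySem.Dict.getD_eq_get?_getD, hlookup e he]
    rfl
  -- the strict order both route lists satisfy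
  set R : String → String → Prop := fun s t =>
    (d.getD t (0, 0)).1 < (d.getD s (0, 0)).1 ∨
      ((d.getD s (0, 0)).1 = (d.getD t (0, 0)).1 ∧ (d.getD s (0, 0)).2 < (d.getD t (0, 0)).2)
    with hR
  have hNlex : N.Pairwise pvLex := hMlex.sublist (pvDedupE_sublist M [])
  have hNpwR : (N.map (·.2.1)).Pairwise R := by
    rw [List.pairwise_map]
    refine hNlex.imp_of_mem (fun {a b} ha hb h => ?_)
    rw [hR]
    simp only [hlookupD a ha, hlookupD b hb]
    unfold pvLex at h
    omega
  -- B's route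
  set routeB := d.keys.foldl (fun acc x => PySem.List.insertBy (pvKLt d) x acc) [] with hrB
  have hBperm : routeB.Perm d.keys := by
    rw [hrB, ← pv_sorted2K_eq]
    exact PySem.List.sorted2_perm d.keys _ _ false
  have hkeysnd : d.keys.Nodup := pv_nodup_keys_fold E PySem.Dict.empty PySem.Dict.nodup_keys_empty
  have hBnodup : routeB.Nodup := hBperm.nodup_iff.2 hkeysnd
  have hmemkeys : ∀ s, s ∈ d.keys ↔ ∃ e ∈ E, e.2.1 = s := by
    intro s
    rw [← PySem.Dict.contains_iff_mem_keys, PySem.Dict.contains_eq_isSome_get?]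
    exact pv_contains_iff E s
  -- on keys, the stored index determines the street
  have hInj : ∀ s ∈ d.keys, ∀ t ∈ d.keys, s ≠ t → (d.getD s (0, 0)).2 ≠ (d.getD t (0, 0)).2 := by
    intro s hs t ht hst
    obtain ⟨es, hes, _⟩ := (hmemkeys s).1 hs
    have hsomes : (d.get? s).isSome = true := (pv_contains_iff E s).2 ⟨es, hes, by assumption⟩
    obtain ⟨vs, hvs⟩ := Option.isSome_iff_exists.1 hsomes
    obtain ⟨et, het, _⟩ := (hmemkeys t).1 ht
    have hsomet : (d.get? t).isSome = true := (pv_contains_iff E t).2 ⟨et, het, by assumption⟩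
    obtain ⟨vt, hvt⟩ := Option.isSome_iff_exists.1 hsomet
    obtain ⟨ebs, hbs, hvseq⟩ := pv_best_get? E s vs hpwE hvs
    obtain ⟨ebt, hbt, hvteq⟩ := pv_best_get? E t vt hpwE hvt
    rw [PySem.Dict.getD_eq_get?_getD, hvs, PySem.Dict.getD_eq_get?_getD, hvt]
    simp only [Option.getD_some, hvseq, hvteq]
    intro hc
    have : ebs = ebt := pv_enum_inj pairs ebs ebt hbs.1 hbt.1 hc
    exact hst (hbs.2.1 ▸ this ▸ hbt.2.1)
  have hBpwR : routeB.Pairwise R := by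
    have h1 : routeB.Pairwise (fun a b => pvKLt d b a = false) :=
      pv_pairwise_foldl_insertBy (pvKLt d) (pv_klt_asym d) (pv_klt_trans d) d.keys [] (by simp)
    have h2 : routeB.Pairwise (fun a b => a ≠ b) := hBnodup
    refine ((h1.and h2).imp_of_mem (fun {a b} ha hb h => ?_))
    obtain ⟨h1', h2'⟩ := h
    have hinj := hInj a (hBperm.subset ha) b (hBperm.subset hb) h2'
    simp only [pvKLt, Bool.or_eq_false_iff, Bool.and_eq_false_iff, decide_eq_false_iff_not,
      Bool.not_eq_eq_eq_not, Bool.not_false, decide_eq_true_eq] at h1'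
    rw [hR]
    omega
  -- the two route lists are permutations of each other
  have hPermRoutes : (N.map (·.2.1)).Perm routeB := by
    rw [List.perm_ext_iff_of_nodup (pv_nodup_dedupE_streets M []) hBnodup]
    intro s
    rw [pv_mem_dedupE_streets M [] s, hBperm.mem_iff, hmemkeys s]
    simp only [List.not_mem_nil, not_false_iff, and_true]
    rw [(hMperm.map (·.2.1)).mem_iff]
    simp [List.mem_map]
  -- hence they are equal
  have hRoutesEq : N.map (·.2.1) = routeB := by
    refine List.eq_of_perm_of_sorted (fun a b _ _ h1 h2 => ?_) hNpwR hBpwR hPermRoutes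
    rw [hR] at h1 h2
    exfalso; omega
  -- assemble
  rw [hSS, pv_foldA (M.map (·.2)) [] 0, pv_dedup_map M []]
  simp only [List.nil_append, List.map_map, zero_add]
  rw [pv_sorted2K_eq d, ← hrB, ← hRoutesEq]
  refine Prod.ext rfl ?_
  simp only [List.map_map]
  congr 1
  refine List.map_congr_left (fun e he => ?_)
  simp only [Function.comp_apply, hlookupD e he]
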